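-- pv_equiv track=rewrite | github.com/satyamsingh-stack/Leetcode | String/Common Words.py | solution
-- ===== SOURCE A (Python) =====
-- def solution(st1,st2):
--     l=[]
--     for i in st1:
--         if(i in st2):
--             l.append(i)
--     l=set(l)
--     l=list(l)
--     s1=0
--     s2=0
--     for i in range(len(l)):
--         s1=s1+st1.count(l[i])
--         s2=s2+st2.count(l[i])
--     return s1+s2
-- ===== SOURCE B (Python) =====
-- def solution(st1, st2):
--     return sum(1 for x in st1 if x in st2) + sum(1 for x in st2 if x in st1)
-- ===== Notes on version B (the rewrite author's own statement) =====
-- stated objective: simpler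
-- what changed: Replaces A's filtered-list build, set dedup and per-distinct-word .count scans by two direct membership-filtered occurrence counts, one pass over each list.
import Mathlib
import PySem

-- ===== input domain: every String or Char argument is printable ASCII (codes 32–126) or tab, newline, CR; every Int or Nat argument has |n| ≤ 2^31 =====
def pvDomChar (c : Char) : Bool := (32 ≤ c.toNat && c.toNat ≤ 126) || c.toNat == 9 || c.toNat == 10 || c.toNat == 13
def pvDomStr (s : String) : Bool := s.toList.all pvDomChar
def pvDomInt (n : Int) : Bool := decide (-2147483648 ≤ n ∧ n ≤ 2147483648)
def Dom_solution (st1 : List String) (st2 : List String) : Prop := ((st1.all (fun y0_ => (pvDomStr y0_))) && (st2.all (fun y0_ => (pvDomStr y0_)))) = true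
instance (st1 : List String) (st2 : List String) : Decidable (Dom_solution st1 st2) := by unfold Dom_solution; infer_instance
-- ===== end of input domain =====

-- B replaces A's filtered-list build, set dedup and per-distinct-word .count scans by two direct
-- membership-filtered occurrence counts (simpler decomposition, same result).

-- ===== PORT A =====
def solution (st1 : List String) (st2 : List String) : Int :=
  let l0 : List String := st1.foldl (fun acc i => if st2.contains i then acc ++ [i] else acc) []
  let l : List String := PySem.Set.ofList l0
  let p : Int × Int :=
    (PySem.List.pyRange 0 (l.length : Int) 1).foldl
      (fun (sp : Int × Int) i =>
        (sp.1 + (st1.count (PySem.List.pyGetD l i "") : Int),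
         sp.2 + (st2.count (PySem.List.pyGetD l i "") : Int)))
      (0, 0)
  p.1 + p.2

-- ===== PORT B =====
def solution_alt (st1 : List String) (st2 : List String) : Int :=
  (st1.countP (fun x => st2.contains x) : Int) + (st2.countP (fun x => st1.contains x) : Int)

-- ===== PRECONDITION & SPEC =====
def Spec_solution (st1 : List String) (st2 : List String) (out : Int) : Prop := out = solution_alt st1 st2
instance (st1 : List String) (st2 : List String) (out : Int) : Decidable (Spec_solution st1 st2 out) := by unfold Spec_solution; infer_instance

-- ===== CLAIM (what is proved, stated in full; the proofs are below) =====
def Claim_equal_solution : Prop := ∀ (st1 : List String) (st2 : List String), Dom_solution st1 st2 → Spec_solution st1 st2 (solution st1 st2)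

-- ===== LEMMAS AND PROOFS =====

-- a 0/1 indicator sum over a duplicate-free list is a membership test
lemma sum_indicator_nodup (d : List String) (hd : d.Nodup) (a : String) :
    (d.map (fun w => if a = w then (1 : Int) else 0)).sum = if a ∈ d then 1 else 0 := by
  induction d with
  | nil => simp
  | cons w d ih =>
    rcases List.nodup_cons.mp hd with ⟨hw, hd'⟩
    by_cases h : a = w
    · subst h
      have hz : ∀ x ∈ List.map (fun w => if a = w then (1 : Int) else 0) d, x = 0 := by
        intro x hx
        rcases List.mem_map.mp hx with ⟨w, hwmem, rfl⟩
        simp only [ite_eq_right_iff]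
        intro e; exact absurd (e ▸ hwmem) hw
      simp [List.sum_eq_zero hz]
    · simp [h, ih hd']

-- summing st.count over a duplicate-free list d that, on elements of st, coincides with
-- membership in `other`, counts the elements of st lying in `other`
lemma sum_counts (d : List String) (hd : d.Nodup) (other st : List String)
    (H : ∀ a ∈ st, (a ∈ d ↔ a ∈ other)) :
    (d.map (fun w => (st.count w : Int))).sum = (st.countP (fun x => other.contains x) : Int) := by
  induction st with
  | nil => simp
  | cons a st ih =>
    have ih' := ih (fun x hx => H x (List.mem_cons_of_mem _ hx))
    have ha := H a (List.mem_cons_self)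
    have hmap : (d.map (fun w => (((a :: st).count w : Nat) : Int))) =
        (d.map (fun w => (st.count w : Int) + (if a = w then (1 : Int) else 0))) := by
      apply List.map_congr_left
      intro w _
      by_cases h : a = w <;> simp [h]
    rw [hmap, List.sum_map_add, ih', sum_indicator_nodup d hd a]
    by_cases h2 : a ∈ other
    · simp [h2, ha.mpr h2]
    · have had : a ∉ d := fun h => h2 (ha.mp h)
      simp [h2, had]

-- ===== VERDICT (by name: the statement is the Claim_ definition above) =====
theorem solution_spec : Claim_equal_solution := by
  intro st1 st2 _
  unfold Spec_solution
  have hl0 : st1.foldl (fun acc i => if st2.contains i then acc ++ [i] else acc) ([] : List String)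
      = List.filter (fun i => st2.contains i) st1 := by
    rw [PySem.List.foldl_append_if_eq_filter]; simp only [List.nil_append]
  set d : List String := PySem.Set.ofList (List.filter (fun i => st2.contains i) st1) with hdef
  have hA : solution st1 st2 =
      ((PySem.List.pyRange 0 (d.length : Int) 1).foldl
        (fun (sp : Int × Int) i =>
          (sp.1 + (st1.count (PySem.List.pyGetD d i "") : Int),
           sp.2 + (st2.count (PySem.List.pyGetD d i "") : Int))) (0, 0)).1 +
      ((PySem.List.pyRange 0 (d.length : Int) 1).foldl
        (fun (sp : Int × Int) i =>
          (sp.1 + (st1.count (PySem.List.pyGetD d i "") : Int),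
           sp.2 + (st2.count (PySem.List.pyGetD d i "") : Int))) (0, 0)).2 := by
    unfold solution
    rw [hl0]
  rw [hA]
  rw [PySem.List.foldl_pyRange_pyGetD' (f := fun (sp : Int × Int) w =>
        (sp.1 + (st1.count w : Int), sp.2 + (st2.count w : Int)))]
  simp only [Int.toNat_zero, List.drop_zero]
  rw [PySem.List.foldl_prod_mk (f := fun (s : Int) (e : String) => s + (st1.count e : Int))
      (g := fun (s : Int) (e : String) => s + (st2.count e : Int))]
  rw [PySem.List.foldl_add, PySem.List.foldl_add]
  unfold solution_alt
  have hd : d.Nodup := PySem.Set.nodup_ofList _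
  have hmem : ∀ a, a ∈ d ↔ (a ∈ st1 ∧ a ∈ st2) := by
    intro a
    simp [hdef, PySem.Set.mem_ofList, List.mem_filter]
  rw [sum_counts d hd st2 st1 (fun a hx => by simp [hmem a, hx]),
      sum_counts d hd st1 st2 (fun a hx => by rw [hmem a]; simp [hx, and_comm])]
  ring
  norm_num
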